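-- pv_equiv track=rewrite | github.com/mohammadfaiizan/ProjectI | DSA/Problem/Queue_Stack/03_Monotonic_Stack/503_Next_Greater_Element_II.py | nextGreaterElements_double_array
-- ===== SOURCE A (Python) =====
-- from typing import List
--
-- def nextGreaterElements_double_array(nums: List[int]) -> List[int]:
--     """
--     Approach 3: Double Array Simulation
--
--     Create doubled array and use standard next greater algorithm.
--
--     Time: O(n), Space: O(n)
--     """
--     n = len(nums)
--     # Create doubled array
--     doubled = nums + nums
--
--     # Find next greater in doubled array
--     result = [-1] * (2 * n)
--     stack = []
--
--     for i in range(2 * n):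
--         while stack and doubled[stack[-1]] < doubled[i]:
--             prev_idx = stack.pop()
--             result[prev_idx] = doubled[i]
--         stack.append(i)
--
--     # Return only first n results
--     return result[:n]
-- ===== SOURCE B (Python) =====
-- from typing import List
--
-- def nextGreaterElements_double_array(nums: List[int]) -> List[int]:
--     n = len(nums)
--     result = []
--     for i in range(n):
--         val = -1
--         for j in range(i + 1, i + n):
--             if nums[j % n] > nums[i]:
--                 val = nums[j % n]
--                 break
--         result.append(val)
--     return result
-- ===== Notes on version B (the rewrite author's own statement) =====
-- stated objective: simpler
-- what changed: Replaces the doubled-array monotonic-stack pass with a direct per-index circular scan (first strictly greater among the next n-1 circular positions), removing the doubled array, the result pre-allocation and the stack.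
import Mathlib
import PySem

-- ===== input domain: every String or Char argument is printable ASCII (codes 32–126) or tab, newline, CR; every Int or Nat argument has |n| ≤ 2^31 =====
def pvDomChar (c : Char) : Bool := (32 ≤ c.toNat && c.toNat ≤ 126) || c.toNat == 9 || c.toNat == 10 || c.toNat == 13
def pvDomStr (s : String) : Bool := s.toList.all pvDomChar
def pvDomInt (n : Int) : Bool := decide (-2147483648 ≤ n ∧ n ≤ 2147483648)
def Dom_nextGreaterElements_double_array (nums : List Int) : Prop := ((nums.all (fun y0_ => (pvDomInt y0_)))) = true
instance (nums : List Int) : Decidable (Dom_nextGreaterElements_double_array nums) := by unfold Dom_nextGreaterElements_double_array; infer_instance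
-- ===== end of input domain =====

-- B replaces A's doubled-array monotonic-stack pass with a direct per-index circular scan: simpler, no stack.


-- ===== PORT A =====
-- the inner `while stack and doubled[stack[-1]] < doubled[i]` loop; Lean list head = Python stack top.
-- All indices are provably in range, so `getD _ 0` is exact for Python's `doubled[...]`.
def pvPopLoop (d : List Int) (x : Int) : List Int → List Nat → List Int × List Nat
  | res, [] => (res, [])
  | res, p :: rest =>
    if d.getD p 0 < x then pvPopLoop d x (res.set p x) rest else (res, p :: rest)

def nextGreaterElements_double_array (nums : List Int) : List Int :=
  let n := nums.length
  let doubled := nums ++ nums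
  let start : List Int × List Nat := (List.replicate (2 * n) (-1), [])
  let fin := (List.range (2 * n)).foldl
    (fun st i =>
      let st' := pvPopLoop doubled (doubled.getD i 0) st.1 st.2
      (st'.1, i :: st'.2)) start
  fin.1.take n

-- ===== PORT B =====
-- inner `for j in range(i+1, i+n): if nums[j % n] > nums[i]: … break` loop of Source B
def pvProbe (nums : List Int) (x : Int) : List Nat → Int
  | [] => -1
  | j :: rest =>
    let v := nums.getD (j % nums.length) 0
    if x < v then v else pvProbe nums x rest

def nextGreaterElements_double_array_alt (nums : List Int) : List Int :=
  let n := nums.length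
  (List.range n).map (fun i => pvProbe nums (nums.getD i 0) (List.range' (i + 1) (n - 1)))

-- ===== PRECONDITION & SPEC =====
def Spec_nextGreaterElements_double_array (nums : List Int) (out : List Int) : Prop := out = nextGreaterElements_double_array_alt nums
instance (nums : List Int) (out : List Int) : Decidable (Spec_nextGreaterElements_double_array nums out) := by unfold Spec_nextGreaterElements_double_array; infer_instance

-- ===== CLAIM (what is proved, stated in full; the proofs are below) =====
def Claim_equal_nextGreaterElements_double_array : Prop := ∀ (nums : List Int), Dom_nextGreaterElements_double_array nums → Spec_nextGreaterElements_double_array nums (nextGreaterElements_double_array nums)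

-- ===== LEMMAS AND PROOFS =====

/-- "windowed next greater": value at the first index `j` with `p < j < i` and `d[p] < d[j]`, else -1. -/
def pvWnge (d : List Int) (i p : Nat) : Int :=
  match (List.range' (p + 1) (i - (p + 1))).find? (fun j => decide (d.getD p 0 < d.getD j 0)) with
  | some j => d.getD j 0
  | none => -1

/-- loop invariant of A's main pass after processing indices `[0, i)` -/
def pvInv (d : List Int) (i : Nat) (res : List Int) (stack : List Nat) : Prop :=
  res.length = d.length ∧
  (∀ p, p < d.length → res.getD p 0 = pvWnge d i p) ∧
  List.Pairwise (· > ·) stack ∧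
  (∀ p ∈ stack, p < i ∧ ∀ j, p < j → j < i → ¬ d.getD p 0 < d.getD j 0) ∧
  (∀ p, p < i → (∀ j, p < j → j < i → ¬ d.getD p 0 < d.getD j 0) → p ∈ stack)

theorem pvPopLoop_eq (d : List Int) (x : Int) (res : List Int) (stack : List Nat) :
    pvPopLoop d x res stack =
      ((stack.takeWhile (fun p => decide (d.getD p 0 < x))).foldl (fun r p => r.set p x) res,
       stack.dropWhile (fun p => decide (d.getD p 0 < x))) := by
  induction stack generalizing res with
  | nil => simp [pvPopLoop]
  | cons p rest ih =>
    show (if d.getD p 0 < x then _ else _) = _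
    by_cases h : d.getD p 0 < x
    · rw [if_pos h, ih, List.takeWhile_cons, List.dropWhile_cons]
      simp only [show (decide (d.getD p 0 < x)) = true from decide_eq_true h, if_true]
      rfl
    · rw [if_neg h, List.takeWhile_cons, List.dropWhile_cons]
      simp only [show (decide (d.getD p 0 < x)) = false from decide_eq_false h, Bool.false_eq_true,
        if_false, List.foldl_nil]

theorem pvFoldlSet_length (x : Int) (l : List Nat) (res : List Int) :
    (l.foldl (fun r p => r.set p x) res).length = res.length := by
  induction l generalizing res with
  | nil => rfl
  | cons q t ih => simp [List.foldl_cons, ih]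

theorem pvFoldlSet_getD (x : Int) (l : List Nat) (res : List Int) (p : Nat)
    (hnd : l.Nodup) (hlt : ∀ q ∈ l, q < res.length) :
    (l.foldl (fun r p => r.set p x) res).getD p 0 =
      if p ∈ l then x else res.getD p 0 := by
  induction l generalizing res with
  | nil => simp
  | cons q t ih =>
    have hnd' : t.Nodup := hnd.of_cons
    have hq : q ∉ t := (List.nodup_cons.mp hnd).1
    have hlt' : ∀ r ∈ t, r < (res.set q x).length := by
      intro r hr; simpa using hlt r (List.mem_cons_of_mem _ hr)
    rw [List.foldl_cons, ih _ hnd' hlt']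
    by_cases hpt : p ∈ t
    · simp [hpt]
    · by_cases hpq : p = q
      · subst hpq
        simp [hpt, hq, List.getD, List.getElem?_set_self' , hlt p (List.mem_cons_self)]
      · simp [hpt, hpq, List.getD, List.getElem?_set_ne (Ne.symm hpq ∘ Eq.symm ∘ Eq.symm)]

-- membership in takeWhile for a predicate antitone along the list
theorem pvMemTakeWhile (d : List Int) (x : Int) (l : List Nat)
    (hmono : List.Pairwise (fun a b => d.getD a 0 ≤ d.getD b 0) l)
    (p : Nat) (hp : p ∈ l) (hpx : d.getD p 0 < x) :
    p ∈ l.takeWhile (fun q => decide (d.getD q 0 < x)) := by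
  induction l with
  | nil => cases hp
  | cons q t ih =>
    have hq : d.getD q 0 < x := by
      rcases List.mem_cons.mp hp with h | h
      · subst h; exact hpx
      · exact lt_of_le_of_lt ((List.pairwise_cons.mp hmono).1 p h) hpx
    rw [List.takeWhile_cons]
    simp only [hq, decide_true, if_true]
    rcases List.mem_cons.mp hp with h | h
    · subst h; exact List.mem_cons_self
    · exact List.mem_cons_of_mem _ (ih (List.pairwise_cons.mp hmono).2 h)

theorem pvMemDropWhile (d : List Int) (x : Int) (l : List Nat)
    (hmono : List.Pairwise (fun a b => d.getD a 0 ≤ d.getD b 0) l)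
    (p : Nat) (hp : p ∈ l.dropWhile (fun q => decide (d.getD q 0 < x))) :
    ¬ d.getD p 0 < x := by
  induction l with
  | nil => simp at hp
  | cons q t ih =>
    rw [List.dropWhile_cons] at hp
    by_cases hq : d.getD q 0 < x
    · simp only [hq, decide_true, if_true] at hp
      exact ih (List.pairwise_cons.mp hmono).2 hp
    · simp only [hq, decide_false, if_false] at hp
      rcases List.mem_cons.mp hp with h | h
      · subst h; exact hq
      · intro hlt
        exact hq (lt_of_le_of_lt ((List.pairwise_cons.mp hmono).1 p h) hlt)

theorem pvFind?_congr (l : List Nat) (p q : Nat → Bool) (h : ∀ x ∈ l, p x = q x) :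
    l.find? p = l.find? q := by
  induction l with
  | nil => rfl
  | cons a t ih =>
    rw [List.find?_cons, List.find?_cons, h a List.mem_cons_self,
      ih (fun x hx => h x (List.mem_cons_of_mem _ hx))]

theorem pvWnge_stop (d : List Int) (i p : Nat) (h : i ≤ p + 1) : pvWnge d i p = -1 := by
  unfold pvWnge
  rw [Nat.sub_eq_zero_of_le h]
  rfl

theorem pvWnge_succ (d : List Int) (i p : Nat) (hp : p < i) :
    pvWnge d (i + 1) p =
      match (List.range' (p + 1) (i - (p + 1))).find?
          (fun j => decide (d.getD p 0 < d.getD j 0)) with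
      | some j => d.getD j 0
      | none => if d.getD p 0 < d.getD i 0 then d.getD i 0 else -1 := by
  unfold pvWnge
  have h1 : (i + 1) - (p + 1) = (i - (p + 1)) + 1 := by omega
  have h2 : List.range' (p + 1) ((i - (p + 1)) + 1) =
      List.range' (p + 1) (i - (p + 1)) ++ [i] := by
    have := (List.range'_append (s := p + 1) (m := i - (p + 1)) (n := 1) (step := 1)).symm
    simp only [List.range'] at this ⊢
    rw [this]
    congr 2
    omega
  rw [h1, h2, List.find?_append]
  rcases hf : (List.range' (p + 1) (i - (p + 1))).find?
      (fun j => decide (d.getD p 0 < d.getD j 0)) with _ | j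
  · simp only [Option.none_or, List.find?_cons, List.find?_nil]
    by_cases hx : d.getD p 0 < d.getD i 0
    · rw [show (decide (d.getD p 0 < d.getD i 0)) = true from decide_eq_true hx, if_pos hx]
    · rw [show (decide (d.getD p 0 < d.getD i 0)) = false from decide_eq_false hx, if_neg hx]
  · rfl

theorem pvMemWindow (p i j : Nat) (hp : p < i) :
    j ∈ List.range' (p + 1) (i - (p + 1)) ↔ p < j ∧ j < i := by
  rw [List.mem_range'_1]
  omega

theorem pvInv_step (d : List Int) (i : Nat) (res : List Int) (stack : List Nat)
    (hi : i < d.length) (h : pvInv d i res stack) :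
    pvInv d (i + 1) (pvPopLoop d (d.getD i 0) res stack).1
      (i :: (pvPopLoop d (d.getD i 0) res stack).2) := by
  obtain ⟨hlen, hres, hpw, hmem, hcomp⟩ := h
  rw [pvPopLoop_eq]
  set pred := fun q => decide (d.getD q 0 < d.getD i 0) with hpreddef
  set T := stack.takeWhile pred with hT
  set Dp := stack.dropWhile pred with hD
  have hsplit : T ++ Dp = stack := List.takeWhile_append_dropWhile
  have hmono : List.Pairwise (fun a b => d.getD a 0 ≤ d.getD b 0) stack := by
    refine hpw.imp_of_mem ?_
    intro a b ha hb hab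
    exact not_lt.mp ((hmem b hb).2 a hab (hmem a ha).1)
  have hstacknd : stack.Nodup := hpw.imp (fun hab => Nat.ne_of_gt hab)
  have hTsub : ∀ q ∈ T, q ∈ stack := by
    intro q hq
    rw [← hsplit]; exact List.mem_append_left _ hq
  have hDsub : ∀ q ∈ Dp, q ∈ stack := by
    intro q hq
    rw [← hsplit]; exact List.mem_append_right _ hq
  have hTmem : ∀ q, q ∈ T ↔ q ∈ stack ∧ d.getD q 0 < d.getD i 0 := by
    intro q
    constructor
    · intro hq
      refine ⟨hTsub q hq, ?_⟩
      have h' := List.mem_takeWhile_imp hq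
      rw [hpreddef] at h'
      simpa using h'
    · rintro ⟨hq, hqx⟩
      rw [hT, hpreddef]
      exact pvMemTakeWhile d (d.getD i 0) stack hmono q hq hqx
  have hDnot : ∀ q ∈ Dp, ¬ d.getD q 0 < d.getD i 0 := by
    intro q hq
    rw [hD, hpreddef] at hq
    exact pvMemDropWhile d (d.getD i 0) stack hmono q hq
  have hTnd : T.Nodup := (List.takeWhile_sublist _).nodup hstacknd
  have hTlt : ∀ q ∈ T, q < res.length := by
    intro q hq
    have := (hmem q (hTsub q hq)).1
    omega
  refine ⟨?_, ?_, ?_, ?_, ?_⟩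
  · simpa [pvFoldlSet_length] using hlen
  · intro p hp
    rw [pvFoldlSet_getD (d.getD i 0) T res p hTnd hTlt]
    by_cases hpi : p < i
    · rw [pvWnge_succ d i p hpi]
      rcases hf : (List.range' (p + 1) (i - (p + 1))).find?
          (fun j => decide (d.getD p 0 < d.getD j 0)) with _ | j
      · -- nothing strictly greater in (p, i) yet: res[p] was -1
        have hall : ∀ j, p < j → j < i → ¬ d.getD p 0 < d.getD j 0 := by
          intro j hj1 hj2 hlt
          have := List.find?_eq_none.mp hf j ((pvMemWindow p i j hpi).mpr ⟨hj1, hj2⟩)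
          exact this (decide_eq_true hlt)
        have hstk : p ∈ stack := hcomp p hpi hall
        by_cases hx : d.getD p 0 < d.getD i 0
        · have hpT : p ∈ T := (hTmem p).mpr ⟨hstk, hx⟩
          rw [if_pos hpT, if_pos hx]
        · have hpT : p ∉ T := fun hq => hx ((hTmem p).mp hq).2
          rw [if_neg hpT, if_neg hx, hres p hp, pvWnge, hf]
      · -- already resolved before i: value unchanged, p was not on the stack
        have hjmem := List.mem_of_find?_eq_some hf
        have hjlt' := List.find?_some hf
        have hjlt : d.getD p 0 < d.getD j 0 := by simpa using hjlt'
        obtain ⟨hj1, hj2⟩ := (pvMemWindow p i j hpi).mp hjmem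
        have hpT : p ∉ T := by
          intro hq
          exact (hmem p (hTsub p hq)).2 j hj1 hj2 hjlt
        rw [if_neg hpT, hres p hp, pvWnge, hf]
    · -- p ≥ i : untouched, both sides -1
      have hpT : p ∉ T := by
        intro hq
        have := (hmem p (hTsub p hq)).1
        omega
      rw [if_neg hpT, hres p hp,
        pvWnge_stop d i p (by omega), pvWnge_stop d (i + 1) p (by omega)]
  · rw [List.pairwise_cons]
    refine ⟨fun q hq => (hmem q (hDsub q hq)).1, hpw.sublist (List.dropWhile_sublist _)⟩
  · intro p hp
    rcases List.mem_cons.mp hp with hpi | hpD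
    · refine ⟨by omega, fun j hj1 hj2 _ => ?_⟩
      omega
    · obtain ⟨hplt, hcl⟩ := hmem p (hDsub p hpD)
      refine ⟨by omega, ?_⟩
      intro j hj1 hj2 hlt
      by_cases hji : j < i
      · exact hcl j hj1 hji hlt
      · have hji' : j = i := by omega
        subst hji'
        exact hDnot p hpD hlt
  · intro p hp hall
    by_cases hpi : p = i
    · subst hpi; exact List.mem_cons_self
    · have hplt : p < i := by omega
      have hstk : p ∈ stack := hcomp p hplt (fun j hj1 hj2 => hall j hj1 (by omega))
      have hnx : ¬ d.getD p 0 < d.getD i 0 := hall i hplt (Nat.lt_succ_self i)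
      rw [← hsplit] at hstk
      rcases List.mem_append.mp hstk with hq | hq
      · exact absurd ((hTmem p).mp hq).2 hnx
      · exact List.mem_cons_of_mem _ hq

theorem pvInv_fold (d : List Int) (m : Nat) (hm : m ≤ d.length) :
    pvInv d m
      ((List.range m).foldl
        (fun st i =>
          ((pvPopLoop d (d.getD i 0) st.1 st.2).1,
            i :: (pvPopLoop d (d.getD i 0) st.1 st.2).2)) (List.replicate d.length (-1), [])).1
      ((List.range m).foldl
        (fun st i =>
          ((pvPopLoop d (d.getD i 0) st.1 st.2).1,
            i :: (pvPopLoop d (d.getD i 0) st.1 st.2).2)) (List.replicate d.length (-1), [])).2 := by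
  induction m with
  | zero =>
    refine ⟨by simp, ?_, by simp, by simp, by omega⟩
    intro p hp
    rw [pvWnge_stop d 0 p (by omega)]
    simp [List.getElem?_replicate, hp]
  | succ m ih =>
    have hm' : m ≤ d.length := by omega
    have hstep := pvInv_step d m _ _ (by omega) (ih hm')
    rw [List.range_succ, List.foldl_append, List.foldl_cons, List.foldl_nil]
    exact hstep

theorem pvInv_final (nums : List Int) :
    pvInv (nums ++ nums) (2 * nums.length)
      ((List.range (2 * nums.length)).foldl
        (fun st i =>
          ((pvPopLoop (nums ++ nums) ((nums ++ nums).getD i 0) st.1 st.2).1,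
            i :: (pvPopLoop (nums ++ nums) ((nums ++ nums).getD i 0) st.1 st.2).2))
        (List.replicate (2 * nums.length) (-1), [])).1
      ((List.range (2 * nums.length)).foldl
        (fun st i =>
          ((pvPopLoop (nums ++ nums) ((nums ++ nums).getD i 0) st.1 st.2).1,
            i :: (pvPopLoop (nums ++ nums) ((nums ++ nums).getD i 0) st.1 st.2).2))
        (List.replicate (2 * nums.length) (-1), [])).2 := by
  have hd : (nums ++ nums).length = 2 * nums.length := by simp [two_mul]
  have h := pvInv_fold (nums ++ nums) (2 * nums.length) (by omega)
  rw [hd] at h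
  exact h

theorem pvProbe_find (nums : List Int) (x : Int) (js : List Nat) :
    pvProbe nums x js =
      match js.find? (fun j => decide (x < nums.getD (j % nums.length) 0)) with
      | some j => nums.getD (j % nums.length) 0
      | none => -1 := by
  induction js with
  | nil => rfl
  | cons j rest ih =>
    show (if x < nums.getD (j % nums.length) 0 then _ else _) = _
    by_cases h : x < nums.getD (j % nums.length) 0
    · rw [if_pos h, List.find?_cons]
      simp only [show (decide (x < nums.getD (j % nums.length) 0)) = true from decide_eq_true h]
    · rw [if_neg h, ih, List.find?_cons]
      simp only [show (decide (x < nums.getD (j % nums.length) 0)) = false from decide_eq_false h]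

theorem pvWnge_eq_probe (nums : List Int) (i : Nat) (hi : i < nums.length) :
    pvWnge (nums ++ nums) (2 * nums.length) i =
      pvProbe nums (nums.getD i 0) (List.range' (i + 1) (nums.length - 1)) := by
  have hn : 0 < nums.length := by omega
  rw [pvProbe_find nums]
  unfold pvWnge
  have hsplit : 2 * nums.length - (i + 1) = (nums.length - 1) + (nums.length - i) := by omega
  rw [hsplit]
  have hr : List.range' (i + 1) ((nums.length - 1) + (nums.length - i)) =
      List.range' (i + 1) (nums.length - 1) ++
        List.range' (i + 1 + (nums.length - 1)) (nums.length - i) := by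
    have := (List.range'_append (s := i + 1) (m := nums.length - 1)
      (n := nums.length - i) (step := 1)).symm
    simpa using this
  rw [hr, List.find?_append]
  have hdi : (nums ++ nums).getD i 0 = nums.getD i 0 := by
    simp [List.getD, List.getElem?_append_left hi]
  have hleft : ∀ j, j < nums.length →
      (nums ++ nums).getD j 0 = nums.getD (j % nums.length) 0 := by
    intro j hj
    simp [List.getD, List.getElem?_append_left hj, Nat.mod_eq_of_lt hj]
  have hright : ∀ j, nums.length ≤ j → j < 2 * nums.length →
      (nums ++ nums).getD j 0 = nums.getD (j - nums.length) 0 := by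
    intro j hj1 hj2
    simp [List.getD, List.getElem?_append_right hj1]
  have hag : ∀ j ∈ List.range' (i + 1) (nums.length - 1),
      (nums ++ nums).getD j 0 = nums.getD (j % nums.length) 0 := by
    intro j hj
    rw [List.mem_range'_1] at hj
    by_cases hjn : j < nums.length
    · exact hleft j hjn
    · rw [hright j (by omega) (by omega)]
      congr 1
      rw [Nat.mod_eq_sub_mod (by omega), Nat.mod_eq_of_lt (by omega)]
  have hcong : (List.range' (i + 1) (nums.length - 1)).find?
        (fun j => decide ((nums ++ nums).getD i 0 < (nums ++ nums).getD j 0)) =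
      (List.range' (i + 1) (nums.length - 1)).find?
        (fun j => decide (nums.getD i 0 < nums.getD (j % nums.length) 0)) := by
    refine pvFind?_congr _ _ _ ?_
    intro j hj
    rw [hdi, hag j hj]
  rw [hcong]
  rcases hf : (List.range' (i + 1) (nums.length - 1)).find?
      (fun j => decide (nums.getD i 0 < nums.getD (j % nums.length) 0)) with _ | j
  · -- no circular next greater among the first n-1 probes: the tail of the doubled
    -- array (indices n+i … 2n-1) repeats values already probed (or nums[i] itself)
    have h2 : (List.range' (i + 1 + (nums.length - 1)) (nums.length - i)).find?
        (fun j => decide ((nums ++ nums).getD i 0 < (nums ++ nums).getD j 0)) = none := by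
      rw [List.find?_eq_none]
      intro j hj
      rw [List.mem_range'_1] at hj
      have hj1 : nums.length + i ≤ j := by omega
      have hj2 : j < 2 * nums.length := by omega
      rw [decide_eq_true_eq, hdi, hright j (by omega) hj2]
      by_cases hje : j = nums.length + i
      · subst hje
        simp [Nat.add_comm]
      · have hmem : j - nums.length ∈ List.range' (i + 1) (nums.length - 1) := by
          rw [List.mem_range'_1]
          omega
        have := List.find?_eq_none.mp hf _ hmem
        rw [decide_eq_true_eq] at this
        rwa [Nat.mod_eq_of_lt (by omega)] at this
    rw [h2]
    rfl
  · have hjmem := List.mem_of_find?_eq_some hf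
    exact hag j hjmem

-- ===== VERDICT (by name: the statement is the Claim_ definition above) =====
theorem nextGreaterElements_double_array_spec : Claim_equal_nextGreaterElements_double_array := by
  intro nums _
  unfold Spec_nextGreaterElements_double_array
  obtain ⟨hlen, hres, -, -, -⟩ := pvInv_final nums
  have hd : (nums ++ nums).length = 2 * nums.length := by simp [two_mul]
  rw [hd] at hlen hres
  have hA : nextGreaterElements_double_array nums =
      ((List.range (2 * nums.length)).foldl
        (fun st i =>
          ((pvPopLoop (nums ++ nums) ((nums ++ nums).getD i 0) st.1 st.2).1,
            i :: (pvPopLoop (nums ++ nums) ((nums ++ nums).getD i 0) st.1 st.2).2))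
        (List.replicate (2 * nums.length) (-1), [])).1.take nums.length := rfl
  have hB : nextGreaterElements_double_array_alt nums =
      (List.range nums.length).map
        (fun i => pvProbe nums (nums.getD i 0) (List.range' (i + 1) (nums.length - 1))) := rfl
  rw [hA, hB]
  refine List.ext_getElem ?_ ?_
  · simp only [List.length_take, List.length_map, List.length_range, hlen]
    omega
  · intro p h1 h2
    simp only [List.length_take, hlen] at h1
    have hpn : p < nums.length := by omega
    have hp2 : p < 2 * nums.length := by omega
    rw [List.getElem_take, List.getElem_map, List.getElem_range]
    rw [← List.getD_eq_getElem _ 0 (by rw [hlen]; omega), hres p hp2,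
      pvWnge_eq_probe nums p hpn]
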